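-- pv_equiv track=rewrite | github.com/pypi-data/pypi-mirror-5 | packages/cjktools/cjktools-1.6.0.tar.gz/cjktools-1.6.0/cjktools/resources/pinyin_table.py | _apply_tone
-- ===== SOURCE A (Python) =====
-- vowels = u'aeiouü'
--
-- tone_to_vowels = {
--     0: u'aeiouü',
--     1: u'āēīōūǖ',
--     2: u'áéíóúǘ',
--     3: u'ǎěǐǒǔǚ',
--     4: u'àèìòùǜ',
-- }
--
-- def _apply_tone(syllable, tone):
--     "Apply a tone to a syllable."
--     if tone == 5:
--         tone = 0
--     results = []
--     results.append(syllable[0])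
--
--     used_tone = False
--     for char in syllable[1:]:
--         if not used_tone and char in vowels:
--             results.append(tone_to_vowels[tone][vowels.index(char)])
--             used_tone = True
--         else:
--             results.append(char)
--
--     return ''.join(results)
-- ===== SOURCE B (Python) =====
-- vowels = u'aeiou\u00fc'
--
-- tone_to_vowels = {
--     0: u'aeiou\u00fc',
--     1: u'\u0101\u0113\u012b\u014d\u016b\u01d6',
--     2: u'\u00e1\u00e9\u00ed\u00f3\u00fa\u01d8',
--     3: u'\u01ce\u011b\u01d0\u01d2\u01d4\u01da',
--     4: u'\u00e0\u00e8\u00ec\u00f2\u00f9\u01dc',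
-- }
--
-- def _apply_tone(syllable, tone):
--     "Apply a tone to a syllable."
--     first = syllable[0]
--     if tone == 5:
--         tone = 0
--     rest = syllable[1:]
--     for i, c in enumerate(rest):
--         if c in vowels:
--             return (first + rest[:i]
--                     + tone_to_vowels[tone][vowels.index(c)]
--                     + rest[i + 1:])
--     return syllable
-- ===== Notes on version B (the rewrite author's own statement) =====
-- stated objective: simpler
-- what changed: Replaces the accumulator-list-plus-used_tone-flag loop by locating the first vowel after position 0 and rebuilding the result from slices (prefix + toned vowel + suffix), returning the input unchanged when no vowel is found.
import Mathlib
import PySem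

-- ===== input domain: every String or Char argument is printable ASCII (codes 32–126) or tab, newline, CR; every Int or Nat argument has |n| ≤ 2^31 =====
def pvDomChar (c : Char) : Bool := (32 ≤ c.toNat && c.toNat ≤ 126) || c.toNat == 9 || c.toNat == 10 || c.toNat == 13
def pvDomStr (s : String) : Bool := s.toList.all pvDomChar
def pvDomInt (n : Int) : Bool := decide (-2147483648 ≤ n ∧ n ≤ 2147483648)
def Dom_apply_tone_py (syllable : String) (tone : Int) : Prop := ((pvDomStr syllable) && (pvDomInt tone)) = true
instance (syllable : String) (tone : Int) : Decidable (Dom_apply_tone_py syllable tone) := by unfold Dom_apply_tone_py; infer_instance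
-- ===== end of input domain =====

-- B is a simpler decomposition (find-first-vowel-then-slice instead of accumulator+flag loop); equivalence proved on Pre_ (nonempty syllable, no KeyError).

-- shared module constants (vowels, tone_to_vowels)
def vowelsPy : List Char := ['a', 'e', 'i', 'o', 'u', 'ü']

def toneToVowelsPy : PySem.Dict Int (List Char) :=
  PySem.Dict.ofList
    [(0, ['a', 'e', 'i', 'o', 'u', 'ü']),
     (1, ['ā', 'ē', 'ī', 'ō', 'ū', 'ǖ']),
     (2, ['á', 'é', 'í', 'ó', 'ú', 'ǘ']),
     (3, ['ǎ', 'ě', 'ǐ', 'ǒ', 'ǔ', 'ǚ']),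
     (4, ['à', 'è', 'ì', 'ò', 'ù', 'ǜ'])]

-- ===== PORT A =====
-- A's loop: state = (results, used_tone), threaded through an Option (none = KeyError)
def applyToneStepA (tone : Int) (st : Option (List Char × Bool)) (c : Char) :
    Option (List Char × Bool) :=
  match st with
  | none => none
  | some (res, used) =>
    if used = false ∧ c ∈ vowelsPy then
      match PySem.Dict.get? toneToVowelsPy tone with
      | none => none   -- KeyError: tone_to_vowels[tone]
      | some tv =>
        match PySem.List.index? vowelsPy c with
        | none => none
        | some k =>
          match tv[k]? with
          | none => none
          | some tc => some (res ++ [tc], true)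
    else some (res ++ [c], used)

def apply_tone_py (syllable : String) (tone : Int) : String :=
  let tone := if tone = 5 then 0 else tone
  let s := syllable.toList
  match PySem.List.pyGet? s 0 with
  | none => ""   -- IndexError on syllable[0]; excluded by Pre_
  | some c0 =>
    match (PySem.List.slice s (some 1) none).foldl (applyToneStepA tone) (some ([c0], false)) with
    | none => ""   -- KeyError; excluded by Pre_
    | some (res, _) => String.ofList res

-- ===== PORT B =====
-- B's loop: for i, c in enumerate(rest): first index of a vowel
def findVowelB : List Char → Nat → Option (Nat × Char)
  | [], _ => none
  | c :: cs, i => if c ∈ vowelsPy then some (i, c) else findVowelB cs (i + 1)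

def apply_tone_py_alt (syllable : String) (tone : Int) : String :=
  let s := syllable.toList
  match PySem.List.pyGet? s 0 with
  | none => ""   -- IndexError on syllable[0]; excluded by Pre_
  | some first =>
    let tone := if tone = 5 then 0 else tone
    let rest := PySem.List.slice s (some 1) none
    match findVowelB rest 0 with
    | none => syllable
    | some (i, c) =>
      match PySem.Dict.get? toneToVowelsPy tone with
      | none => ""   -- KeyError; excluded by Pre_
      | some tv =>
        match PySem.List.index? vowelsPy c with
        | none => ""
        | some k =>
          match tv[k]? with
          | none => ""
          | some tc =>
            String.ofList ([first] ++ PySem.List.slice rest none (some (i : Int))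
              ++ [tc] ++ PySem.List.slice rest (some ((i : Int) + 1)) none)

-- ===== PRECONDITION & SPEC =====
-- Pre_ excludes the empty syllable (A raises IndexError) and tones outside {0..5} when a
-- vowel occurs after position 0 (A raises KeyError); everywhere else A returns normally.
def Pre_apply_tone_py (syllable : String) (tone : Int) : Prop :=
  syllable.toList ≠ [] ∧
    (tone = 5 ∨ (0 ≤ tone ∧ tone ≤ 4) ∨ ∀ c ∈ syllable.toList.drop 1, c ∉ vowelsPy)
instance (syllable : String) (tone : Int) : Decidable (Pre_apply_tone_py syllable tone) := by
  unfold Pre_apply_tone_py; infer_instance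

def pvWitness_apply_tone_py : String × Int := ("zhang", 4)

def Spec_apply_tone_py (syllable : String) (tone : Int) (out : String) : Prop := out = apply_tone_py_alt syllable tone
instance (syllable : String) (tone : Int) (out : String) : Decidable (Spec_apply_tone_py syllable tone out) := by unfold Spec_apply_tone_py; infer_instance

-- ===== CLAIM (what is proved, stated in full; the proofs are below) =====
def Claim_equal_apply_tone_py : Prop := ∀ (syllable : String) (tone : Int), Dom_apply_tone_py syllable tone → Pre_apply_tone_py syllable tone → Spec_apply_tone_py syllable tone (apply_tone_py syllable tone)

-- ===== LEMMAS AND PROOFS =====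

-- the toned character A computes in its vowel branch (helper for the proofs only)
def tcOpt (tone : Int) (c : Char) : Option Char :=
  match PySem.Dict.get? toneToVowelsPy tone with
  | none => none
  | some tv =>
    match PySem.List.index? vowelsPy c with
    | none => none
    | some k => tv[k]?

theorem tcOpt_isSome (tone : Int) (c : Char)
    (htone : tone = 0 ∨ tone = 1 ∨ tone = 2 ∨ tone = 3 ∨ tone = 4)
    (hc : c ∈ vowelsPy) : ∃ tc, tcOpt tone c = some tc := by
  rcases htone with h | h | h | h | h <;> subst h <;>
    fin_cases hc <;> exact ⟨_, rfl⟩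

theorem findVowelB_shift (rest : List Char) (j : Nat) :
    findVowelB rest j = (findVowelB rest 0).map (fun p => (p.1 + j, p.2)) := by
  induction rest generalizing j with
  | nil => simp [findVowelB]
  | cons c cs ih =>
    by_cases hc : c ∈ vowelsPy
    · simp [findVowelB, hc]
    · simp only [findVowelB, if_neg hc, ih (j + 1), ih 1, Option.map_map]
      cases findVowelB cs 0 <;> simp; omega

theorem findVowelB_some (rest : List Char) (i : Nat) (c : Char)
    (h : findVowelB rest 0 = some (i, c)) : c ∈ rest ∧ c ∈ vowelsPy := by
  induction rest generalizing i with
  | nil => simp [findVowelB] at h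
  | cons a cs ih =>
    by_cases ha : a ∈ vowelsPy
    · simp [findVowelB, ha] at h
      obtain ⟨_, rfl⟩ := h
      exact ⟨List.mem_cons_self, ha⟩
    · rw [findVowelB, if_neg ha, findVowelB_shift cs 1] at h
      cases hcs : findVowelB cs 0 with
      | none => simp [hcs] at h
      | some p =>
        simp [hcs] at h
        obtain ⟨i', c'⟩ := p
        obtain ⟨rfl, rfl⟩ := h.2
        exact ⟨List.mem_cons_of_mem _ (ih _ hcs).1, (ih _ hcs).2⟩

-- A's fold once the tone mark has been used just appends the rest
theorem foldA_used (tone : Int) (rest res : List Char) :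
    rest.foldl (applyToneStepA tone) (some (res, true)) = some (res ++ rest, true) := by
  induction rest generalizing res with
  | nil => simp
  | cons c cs ih => simp [applyToneStepA, ih]

-- A's fold over an errored state stays errored
theorem foldA_none (tone : Int) (rest : List Char) :
    rest.foldl (applyToneStepA tone) none = none := by
  induction rest with
  | nil => rfl
  | cons c cs ih => simpa [applyToneStepA] using ih

-- main invariant: A's fold from (res, false) expressed through B's vowel search
theorem foldA_char (tone : Int) (rest : List Char) (res : List Char) :
    rest.foldl (applyToneStepA tone) (some (res, false)) =
      match findVowelB rest 0 with
      | none => some (res ++ rest, false)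
      | some (i, c) =>
        (tcOpt tone c).map (fun tc => (res ++ rest.take i ++ tc :: rest.drop (i + 1), true)) := by
  induction rest generalizing res with
  | nil => simp [findVowelB]
  | cons c cs ih =>
    by_cases hc : c ∈ vowelsPy
    · rw [findVowelB, if_pos hc]
      have hstep : applyToneStepA tone (some (res, false)) c =
          (tcOpt tone c).map (fun tc => (res ++ [tc], true)) := by
        rw [applyToneStepA, if_pos ⟨rfl, hc⟩, tcOpt]
        cases PySem.Dict.get? toneToVowelsPy tone with
        | none => rfl
        | some tv =>
          cases PySem.List.index? vowelsPy c with
          | none => rfl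
          | some k => cases hg : tv[k]? <;> simp [hg]
      rw [List.foldl_cons, hstep]
      cases htc : tcOpt tone c with
      | none => simp [htc, foldA_none]
      | some tc => simp [htc, foldA_used]
    · rw [findVowelB, if_neg hc, findVowelB_shift cs 1, List.foldl_cons]
      have hstep : applyToneStepA tone (some (res, false)) c = some (res ++ [c], false) := by
        rw [applyToneStepA]
        simp [hc]
      rw [hstep, ih]
      cases hcs : findVowelB cs 0 with
      | none => simp
      | some p =>
        obtain ⟨i, c'⟩ := p
        cases tcOpt tone c' <;> simp

-- ===== VERDICT =====
theorem apply_tone_py_spec : Claim_equal_apply_tone_py := by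
  intro syllable tone _hdom hpre
  unfold Spec_apply_tone_py
  obtain ⟨hne, htone⟩ := hpre
  unfold apply_tone_py apply_tone_py_alt
  cases hs : syllable.toList with
  | nil => exact absurd hs hne
  | cons c0 rest =>
    simp only [PySem.List.pyGet?_zero_cons, PySem.List.slice_from_one, List.tail_cons]
    set tone' : Int := if tone = 5 then 0 else tone with htone'
    rw [foldA_char]
    cases hfv : findVowelB rest 0 with
    | none =>
      -- no vowel after position 0: both sides return the original syllable
      have : String.ofList (c0 :: rest) = syllable := by
        rw [← hs, String.ofList_toList]
      simpa using this
    | some p =>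
      obtain ⟨i, c⟩ := p
      obtain ⟨hmem, hcv⟩ := findVowelB_some rest i c hfv
      -- the tone is a real tone key: the third disjunct of Pre_ is contradicted by c
      have htone5 : tone' = 0 ∨ tone' = 1 ∨ tone' = 2 ∨ tone' = 3 ∨ tone' = 4 := by
        rcases htone with h | h | h
        · left; simp [htone', h]
        · by_cases h5 : tone = 5
          · left; simp [htone', h5]
          · rw [htone', if_neg h5]; omega
        · exact absurd hcv (h c (by simpa [hs] using hmem))
      obtain ⟨tc, htc⟩ := tcOpt_isSome tone' c htone5 hcv
      have htc' := htc
      rw [tcOpt] at htc'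
      cases hd : PySem.Dict.get? toneToVowelsPy tone' with
      | none => rw [hd] at htc'; exact absurd htc' (by simp)
      | some tv =>
        rw [hd] at htc'
        cases hk : PySem.List.index? vowelsPy c with
        | none => rw [hk] at htc'; exact absurd htc' (by simp)
        | some k =>
          rw [hk] at htc'
          simp only at htc'
          have hsl1 : PySem.List.slice rest none (some ((i : Nat) : Int)) = rest.take i :=
            PySem.List.slice_to_natCast rest i
          have hsl2 : PySem.List.slice rest (some (((i : Nat) : Int) + 1)) none = rest.drop (i + 1) := by
            have h1 : ((i : Nat) : Int) + 1 = (((i + 1 : Nat) : Nat) : Int) := by push_cast; ring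
            rw [h1, PySem.List.slice_from_natCast]
          simp only [hk, htc', htc, hsl1, hsl2, Option.map_some]
          simp
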